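-- pv_equiv track=rewrite | github.com/Utkarsh1012Dewan/Leetcode-Gfg-Solutions | Minimum Integer - GFG/minimum-integer.py | minimumInteger
-- ===== SOURCE A (Python) =====
-- from typing import List
--
-- def minimumInteger(N : int, A : List[int]) -> int:
--
--     if N == 1:
--         return A[0]
--
--     add = 0
--     for i in A:
--         add+=i
--
--     currMin = float("inf")
--
--     for i in A:
--         if i*N >=add:
--             currMin = min(currMin,i)
--
--     return currMin
-- ===== SOURCE B (Python) =====
-- def minimumInteger(N, A):
--     if N == 1:
--         return A[0]
--     total = sum(A)
--     for i in sorted(A):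
--         if i * N >= total:
--             return i
--     return float("inf")
-- ===== Notes on version B (the rewrite author's own statement) =====
-- stated objective: alternative
-- what changed: Replaces A's running-minimum accumulator over the unsorted list with sort-then-first-match: B returns the first qualifying element of sorted(A), which equals the minimum qualifying element.
-- outside the precondition, e.g. on minimumInteger(0, [1]): A returns inf, B returns inf; on minimumInteger(1, []): A raises IndexError, B raises IndexError
import Mathlib
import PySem

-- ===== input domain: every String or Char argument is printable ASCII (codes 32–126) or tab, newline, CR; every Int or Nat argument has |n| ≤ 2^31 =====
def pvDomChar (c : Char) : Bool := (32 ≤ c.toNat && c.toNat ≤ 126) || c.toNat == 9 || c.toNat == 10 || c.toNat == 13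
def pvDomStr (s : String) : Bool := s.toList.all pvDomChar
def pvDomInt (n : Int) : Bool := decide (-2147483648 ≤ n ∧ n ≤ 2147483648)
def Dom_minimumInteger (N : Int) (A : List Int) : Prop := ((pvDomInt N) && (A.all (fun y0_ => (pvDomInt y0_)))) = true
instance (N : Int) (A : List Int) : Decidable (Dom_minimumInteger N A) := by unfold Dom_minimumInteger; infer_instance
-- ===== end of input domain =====

-- ===== PORT A =====
-- B replaces A's running-minimum scan with sort-then-first-match (objective: alternative).
-- Python's float("inf") accumulator is modeled as Option Int (none = inf); Pre_ excludes
-- inputs where A returns inf (a float, not an int) or raises IndexError.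
def minimumInteger (N : Int) (A : List Int) : Int :=
  if N = 1 then (PySem.List.pyGet? A 0).getD 0
  else
    let add := A.foldl (fun s i => s + i) 0
    let currMin := A.foldl
      (fun c i => if i * N ≥ add then
          some (match c with | none => i | some m => min m i)
        else c) (none : Option Int)
    currMin.getD 0

-- ===== PORT B =====
def minimumInteger_alt (N : Int) (A : List Int) : Int :=
  if N = 1 then (PySem.List.pyGet? A 0).getD 0
  else
    let total := A.foldl (fun s i => s + i) 0
    match (PySem.List.sorted A (fun x => x) false).find? (fun i => i * N ≥ total) with
    | some i => i
    | none => 0  -- float("inf"): excluded by Pre_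

-- ===== PRECONDITION & SPEC =====
-- Pre_ excludes (a) N = 1 with empty A, where A raises IndexError, and (b) inputs with no
-- element i satisfying i*N ≥ sum(A), where A returns float("inf"), which is not an int.
def Pre_minimumInteger (N : Int) (A : List Int) : Prop :=
  (N = 1 → A ≠ []) ∧ (N ≠ 1 → ∃ i ∈ A, i * N ≥ A.sum)
instance (N : Int) (A : List Int) : Decidable (Pre_minimumInteger N A) := by
  unfold Pre_minimumInteger; infer_instance
def pvWitness_minimumInteger : Int × List Int := (3, [1, 2, 3])
def Spec_minimumInteger (N : Int) (A : List Int) (out : Int) : Prop := out = minimumInteger_alt N A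
instance (N : Int) (A : List Int) (out : Int) : Decidable (Spec_minimumInteger N A out) := by unfold Spec_minimumInteger; infer_instance

-- ===== CLAIM (what is proved, stated in full; the proofs are below) =====
def Claim_equal_minimumInteger : Prop := ∀ (N : Int) (A : List Int), Dom_minimumInteger N A → Pre_minimumInteger N A → Spec_minimumInteger N A (minimumInteger N A)

-- ===== LEMMAS AND PROOFS =====

-- A's fold over the list with a min-accumulator computes min? of the qualifying elements.
theorem foldA_eq_min? (q : Int → Prop) [DecidablePred q] (l : List Int) (acc : Option Int) :
    l.foldl (fun c i => if q i then
        some (match c with | none => i | some m => min m i) else c) acc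
      = match acc with
        | none => (l.filter (fun i => decide (q i))).min?
        | some m => some ((l.filter (fun i => decide (q i))).foldl min m) := by
  induction l generalizing acc with
  | nil => cases acc <;> simp [List.min?]
  | cons a t ih =>
    by_cases hp : q a
    · cases acc <;> simp [hp, ih, List.min?]
    · cases acc <;> simp [hp, ih]

theorem foldl_min_of_le (m : Int) (l : List Int) (h : ∀ x ∈ l, m ≤ x) :
    l.foldl min m = m := by
  induction l with
  | nil => rfl
  | cons a t ih =>
    have hm : min m a = m := min_eq_left (h a (by simp))
    simp only [List.foldl, hm]
    exact ih (fun x hx => h x (by simp [hx]))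

-- On an ascending list, the first element satisfying p is the minimum satisfying element.
theorem find?_pairwise_eq_min? (p : Int → Bool) (l : List Int)
    (h : l.Pairwise (· ≤ ·)) : l.find? p = (l.filter p).min? := by
  induction l with
  | nil => rfl
  | cons a t ih =>
    rcases List.pairwise_cons.mp h with ⟨hle, ht⟩
    by_cases hp : p a = true
    · simp only [List.find?, List.filter, hp, List.min?]
      rw [foldl_min_of_le a _ (fun x hx => hle x (List.mem_of_mem_filter hx))]
    · simp [List.find?, List.filter, hp, ih ht]

theorem min?_eq_of_perm {l₁ l₂ : List Int} (h : l₁.Perm l₂) : l₁.min? = l₂.min? := by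
  cases hm : l₂.min? with
  | none =>
    have h2 : l₂ = [] := by
      cases l₂ with
      | nil => rfl
      | cons b t => simp [List.min?] at hm
    subst h2
    simpa using h
  | some m =>
    rcases List.min?_eq_some_iff.mp hm with ⟨hmem, hall⟩
    exact List.min?_eq_some_iff.mpr ⟨h.mem_iff.mpr hmem, fun x hx => hall x (h.subset hx)⟩

theorem sum_eq_foldl (l : List Int) : l.foldl (fun s i => s + i) 0 = l.sum := by
  simp [List.sum_eq_foldl]

-- ===== VERDICT (by name: the statement is the Claim_ definition above) =====
theorem minimumInteger_spec : Claim_equal_minimumInteger := by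
  intro N A _ hpre
  unfold Spec_minimumInteger minimumInteger minimumInteger_alt
  by_cases h1 : N = 1
  · simp [h1]
  · simp only [if_neg h1]
    set add := A.foldl (fun s i => s + i) 0 with hadd
    set pb : Int → Bool := fun i => decide (i * N ≥ add) with hpb
    have hfind : (PySem.List.sorted A (fun x => x) false).find? pb = (A.filter pb).min? := by
      rw [find?_pairwise_eq_min? pb _ (PySem.List.sorted_pairwise A (fun x => x)),
        min?_eq_of_perm ((PySem.List.sorted_perm A (fun x => x) false).filter pb)]
    have hfold : A.foldl (fun c i => if i * N ≥ add then
          some (match c with | none => i | some m => min m i) else c) (none : Option Int)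
        = (A.filter pb).min? := by
      rw [foldA_eq_min? (fun i => i * N ≥ add) A none]
    obtain ⟨i, hi, hqi⟩ := hpre.2 h1
    have hsum : add = A.sum := by rw [hadd, sum_eq_foldl]
    have hifilt : i ∈ A.filter pb := by
      rw [List.mem_filter]
      refine ⟨hi, ?_⟩
      rw [hpb]
      simpa [hsum] using hqi
    have hne : A.filter pb ≠ [] := fun hnil => by simp [hnil] at hifilt
    obtain ⟨m, hfm⟩ : ∃ m, (A.filter pb).min? = some m := by
      cases hfm : (A.filter pb).min? with
      | none => exact absurd (List.min?_eq_none_iff.mp hfm) hne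
      | some m => exact ⟨m, rfl⟩
    rw [hfold, hfind, hfm]
    rfl
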